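-- pv_equiv track=rewrite | github.com/baudren/advent-of-code | 2023/day14.py | move_grid_south
-- ===== SOURCE A (Python) =====
-- def move_grid_south(grid, bounds):
--     moved = False
--     for row in range(bounds[0]-2, -1, -1):
--         for col in range(bounds[1]):
--             key = (row, col)
--             before = (row+1, col)
--             if grid.get(key, '') == 'O' and before not in grid:
--                 grid[before] = 'O'
--                 del grid[key]
--                 moved = True
--     return moved
-- ===== SOURCE B (Python) =====
-- def move_grid_south(grid, bounds):
--     # Same in-place mutation of grid as the original; sorts the rocks instead of
--     # scanning the whole bounds rectangle.
--     rocks = sorted(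
--         (pos for pos, val in grid.items()
--          if val == 'O' and 0 <= pos[0] <= bounds[0] - 2 and 0 <= pos[1] < bounds[1]),
--         key=lambda pos: (-pos[0], pos[1]))
--     moved = False
--     for row, col in rocks:
--         below = (row + 1, col)
--         if below not in grid:
--             grid[below] = 'O'
--             del grid[(row, col)]
--             moved = True
--     return moved
-- ===== Notes on version B (the rewrite author's own statement) =====
-- stated objective: faster
-- what changed: Replaces A's scan of every (row,col) cell of the bounds[0] x bounds[1] rectangle by collecting the in-range round rocks from the dict, sorting them southmost-row-first (key (-row, col)), and doing one pass over that sorted list; grid is mutated in place identically.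
import Mathlib
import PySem

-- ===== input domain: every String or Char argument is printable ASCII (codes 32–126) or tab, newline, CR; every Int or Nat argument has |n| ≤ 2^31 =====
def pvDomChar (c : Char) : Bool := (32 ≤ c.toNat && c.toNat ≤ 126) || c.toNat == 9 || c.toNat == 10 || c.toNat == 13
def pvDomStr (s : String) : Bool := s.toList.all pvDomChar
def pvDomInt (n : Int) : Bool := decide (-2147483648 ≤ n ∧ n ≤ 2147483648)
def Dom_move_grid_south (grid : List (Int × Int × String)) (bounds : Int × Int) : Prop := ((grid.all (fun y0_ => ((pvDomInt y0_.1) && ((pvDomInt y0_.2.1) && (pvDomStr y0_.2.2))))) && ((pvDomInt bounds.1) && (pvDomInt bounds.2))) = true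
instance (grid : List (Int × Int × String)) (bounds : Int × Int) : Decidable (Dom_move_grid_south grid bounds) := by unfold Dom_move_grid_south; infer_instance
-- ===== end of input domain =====

-- B replaces A's scan of the whole bounds rectangle by a sort of the in-range rocks
-- (southmost row first) followed by one pass over them; both Pythons mutate the grid
-- dict identically in place, the claim proved here is about the returned Bool.

-- ===== PORT A =====
-- the harness passes the dict as a list of (row, col, value) triples; dict(triples) semantics
def pvToDict (grid : List (Int × Int × String)) : PySem.Dict (Int × Int) String :=
  grid.foldl (fun d e => d.insert (e.1, e.2.1) e.2.2) PySem.Dict.empty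

-- loop body of A: one cell (row, col)
def pvStepA (s : PySem.Dict (Int × Int) String × Bool) (row col : Int) :
    PySem.Dict (Int × Int) String × Bool :=
  if s.1.getD (row, col) "" == "O" && !(s.1.contains (row + 1, col)) then
    ((s.1.insert (row + 1, col) "O").erase (row, col), true)
  else s

def move_grid_south (grid : List (Int × Int × String)) (bounds : Int × Int) : Bool :=
  ((PySem.List.pyRange (bounds.1 - 2) (-1) (-1)).foldl (fun s row =>
      (PySem.List.pyRange 0 bounds.2 1).foldl (fun s col => pvStepA s row col) s)
    (pvToDict grid, false)).2

-- ===== PORT B =====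
-- loop body of B: one rock at pos
def pvStepB (s : PySem.Dict (Int × Int) String × Bool) (pos : Int × Int) :
    PySem.Dict (Int × Int) String × Bool :=
  if !(s.1.contains (pos.1 + 1, pos.2)) then
    ((s.1.insert (pos.1 + 1, pos.2) "O").erase pos, true)
  else s

def move_grid_south_alt (grid : List (Int × Int × String)) (bounds : Int × Int) : Bool :=
  ((PySem.List.sorted2
      (((pvToDict grid).items.filter (fun p => p.2 == "O" && decide (0 ≤ p.1.1)
          && decide (p.1.1 ≤ bounds.1 - 2) && decide (0 ≤ p.1.2)
          && decide (p.1.2 < bounds.2))).map (fun p => p.1))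
      (fun pos => -pos.1) (fun pos => pos.2)).foldl
    (fun s pos => pvStepB s pos) (pvToDict grid, false)).2

-- ===== PRECONDITION & SPEC =====
def Spec_move_grid_south (grid : List (Int × Int × String)) (bounds : Int × Int) (out : Bool) : Prop := out = move_grid_south_alt grid bounds
instance (grid : List (Int × Int × String)) (bounds : Int × Int) (out : Bool) : Decidable (Spec_move_grid_south grid bounds out) := by unfold Spec_move_grid_south; infer_instance

-- ===== CLAIM (what is proved, stated in full; the proofs are below) =====
def Claim_equal_move_grid_south : Prop := ∀ (grid : List (Int × Int × String)) (bounds : Int × Int), Dom_move_grid_south grid bounds → Spec_move_grid_south grid bounds (move_grid_south grid bounds)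

-- ===== LEMMAS AND PROOFS =====

-- the canonical processing order: rows south to north, cols west to east, rocks only
def pvRocks (d0 : PySem.Dict (Int × Int) String) (r m : Int) : List (Int × Int) :=
  (PySem.List.pyRange r (-1) (-1)).flatMap (fun row =>
    ((PySem.List.pyRange 0 m 1).filter (fun c => d0.getD (row, c) "" == "O")).map
      (fun c => (row, c)))

theorem pvRocks_cons (d0 : PySem.Dict (Int × Int) String) (r m : Int) (h : (-1 : Int) < r) :
    pvRocks d0 r m =
      ((PySem.List.pyRange 0 m 1).filter (fun c => d0.getD (r, c) "" == "O")).map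
        (fun c => (r, c)) ++ pvRocks d0 (r - 1) m := by
  unfold pvRocks
  rw [PySem.List.pyRange_neg_one_cons h, List.flatMap_cons]

theorem pvRocks_nil (d0 : PySem.Dict (Int × Int) String) (r m : Int) (h : r ≤ -1) :
    pvRocks d0 r m = [] := by
  unfold pvRocks
  rw [PySem.List.pyRange_neg_one_eq_nil h, List.flatMap_nil]

-- membership in the canonical rock list
theorem pv_mem_rocks (d0 : PySem.Dict (Int × Int) String) (r m : Int) (p : Int × Int) :
    p ∈ pvRocks d0 r m ↔
      0 ≤ p.1 ∧ p.1 ≤ r ∧ 0 ≤ p.2 ∧ p.2 < m ∧ d0.getD p "" = "O" := by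
  unfold pvRocks
  simp only [List.mem_flatMap, List.mem_map, List.mem_filter,
    PySem.List.mem_pyRange_neg_one, PySem.List.mem_pyRange_one]
  constructor
  · rintro ⟨row, hrow, c, ⟨hc, hget⟩, rfl⟩
    simp only [beq_iff_eq] at hget
    exact ⟨by omega, by omega, hc.1, hc.2, hget⟩
  · rintro ⟨h1, h2, h3, h4, h5⟩
    exact ⟨p.1, ⟨by omega, h2⟩, p.2, ⟨⟨h3, h4⟩, by simp [h5]⟩, rfl⟩

-- dict observation lemmas
theorem pv_get?_erase (d : PySem.Dict (Int × Int) String) (k k' : Int × Int) :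
    (d.erase k).get? k' = if k' = k then none else d.get? k' := by
  obtain ⟨l⟩ := d
  induction l with
  | nil => simp [PySem.Dict.erase, PySem.Dict.get?]
  | cons p t ih =>
    simp only [PySem.Dict.erase, PySem.Dict.get?, List.filter_cons] at *
    by_cases h1 : p.1 = k <;> by_cases h2 : p.1 = k' <;> by_cases h3 : k' = k <;>
      simp_all

theorem pvStepB_get?_of_ne (s : PySem.Dict (Int × Int) String × Bool) (p k : Int × Int)
    (h1 : k ≠ p) (h2 : k ≠ (p.1 + 1, p.2)) :
    (pvStepB s p).1.get? k = s.1.get? k := by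
  unfold pvStepB
  split
  · simp only [pv_get?_erase, if_neg h1]
    exact PySem.Dict.get?_insert_of_ne _ _ h2
  · rfl

theorem pvStepB_getD_of_ne (s : PySem.Dict (Int × Int) String × Bool) (p k : Int × Int)
    (h1 : k ≠ p) (h2 : k ≠ (p.1 + 1, p.2)) :
    (pvStepB s p).1.getD k "" = s.1.getD k "" := by
  rw [PySem.Dict.getD_eq_get?_getD, PySem.Dict.getD_eq_get?_getD,
    pvStepB_get?_of_ne s p k h1 h2]

-- a fold over positions strictly south of row a does not touch row a
theorem pv_fold_getD_of_lt (ps : List (Int × Int)) :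
    ∀ (s : PySem.Dict (Int × Int) String × Bool) (a b : Int), (∀ p ∈ ps, a < p.1) →
    (ps.foldl (fun s pos => pvStepB s pos) s).1.getD (a, b) "" = s.1.getD (a, b) "" := by
  induction ps with
  | nil => intro s a b _; rfl
  | cons p t ih =>
    intro s a b h
    have hp := h p (by simp)
    rw [List.foldl_cons, ih _ a b (fun q hq => h q (by simp [hq]))]
    refine pvStepB_getD_of_ne s p (a, b) ?_ ?_
    · intro he
      have h' := congrArg Prod.fst he
      simp only [] at h'
      omega
    · intro he
      have h' := congrArg Prod.fst he
      simp only [] at h'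
      omega

-- within a row: A's scan over all cols = B's pass over this row's rocks
theorem pv_row_eq (d0 : PySem.Dict (Int × Int) String) (r : Int) :
    ∀ (cs : List Int) (s : PySem.Dict (Int × Int) String × Bool), cs.Nodup →
    (∀ c ∈ cs, s.1.getD (r, c) "" = d0.getD (r, c) "") →
    cs.foldl (fun s c => pvStepA s r c) s
      = ((cs.filter (fun c => d0.getD (r, c) "" == "O")).map (fun c => (r, c))).foldl
          (fun s pos => pvStepB s pos) s := by
  intro cs
  induction cs with
  | nil => intro s _ _; rfl
  | cons c t ih =>
    intro s hnd hinv
    have hs : s.1.getD (r, c) "" = d0.getD (r, c) "" := hinv c (by simp)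
    rw [List.filter_cons]
    by_cases h : d0.getD (r, c) "" = "O"
    · have hstep : pvStepA s r c = pvStepB s (r, c) := by
        unfold pvStepA pvStepB
        simp [hs, h]
      have hcond : (d0.getD (r, c) "" == "O") = true := by simp [h]
      simp only [hcond, if_pos trivial, List.map_cons, List.foldl_cons, hstep]
      refine ih (pvStepB s (r, c)) hnd.of_cons ?_
      intro c' hc'
      have hne : c' ≠ c := by
        intro he; exact (List.nodup_cons.mp hnd).1 (he ▸ hc')
      rw [pvStepB_getD_of_ne s (r, c) (r, c')
        (by simp [hne])
        (by intro he; have h' := congrArg Prod.fst he; simp only [] at h'; omega)]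
      exact hinv c' (by simp [hc'])
    · have hstep : pvStepA s r c = s := by
        unfold pvStepA
        simp [hs, h]
      have hcond : (d0.getD (r, c) "" == "O") = false := by simpa using h
      simp only [hcond, if_neg Bool.false_ne_true, List.foldl_cons, hstep]
      exact ih s hnd.of_cons (fun c' hc' => hinv c' (by simp [hc']))

-- whole grid: A's nested scan = B's pass over the canonical rock list
theorem pv_grid_eq (d0 : PySem.Dict (Int × Int) String) (m : Int) :
    ∀ (k : Nat) (r : Int), r + 1 ≤ (k : Int) →
    ∀ (s : PySem.Dict (Int × Int) String × Bool),
    (∀ a b : Int, a ≤ r → s.1.getD (a, b) "" = d0.getD (a, b) "") →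
    (PySem.List.pyRange r (-1) (-1)).foldl (fun s row =>
        (PySem.List.pyRange 0 m 1).foldl (fun s col => pvStepA s row col) s) s
      = (pvRocks d0 r m).foldl (fun s pos => pvStepB s pos) s := by
  intro k
  induction k with
  | zero =>
    intro r hr s _
    rw [PySem.List.pyRange_neg_one_eq_nil (by omega : r ≤ -1),
      pvRocks_nil d0 r m (by omega)]
    rfl
  | succ k ih =>
    intro r hr s hinv
    by_cases hneg : r ≤ -1
    · rw [PySem.List.pyRange_neg_one_eq_nil hneg, pvRocks_nil d0 r m hneg]
      rfl
    · rw [pvRocks_cons d0 r m (by omega), List.foldl_append,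
        PySem.List.pyRange_neg_one_cons (by omega : (-1 : Int) < r), List.foldl_cons]
      rw [pv_row_eq d0 r _ s (PySem.List.nodup_pyRange_one 0 m)
        (fun c _ => hinv r c (le_refl r))]
      refine ih (r - 1) (by omega) _ ?_
      intro a b ha
      rw [pv_fold_getD_of_lt _ s a b ?_]
      · exact hinv a b (by omega)
      · intro p hp
        simp only [List.mem_map, List.mem_filter] at hp
        obtain ⟨c, _, rfl⟩ := hp
        omega

-- sorted2 with keys (-row, col) is sorting by the lexicographic Int × Int key
theorem pv_sorted2_eq_lex (xs : List (Int × Int)) :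
    PySem.List.sorted2 xs (fun pos => -pos.1) (fun pos => pos.2)
      = PySem.List.sorted xs (fun pos => (toLex (-pos.1, pos.2) : Int ×ₗ Int)) := by
  have hbe : (fun (a b : Int × Int) => decide (-a.1 < -b.1)
        || (!decide (-b.1 < -a.1) && decide (a.2 < b.2)))
      = (fun (a b : Int × Int) =>
          decide ((toLex (-a.1, a.2) : Int ×ₗ Int) < toLex (-b.1, b.2))) := by
    funext a b
    by_cases h1 : -a.1 < -b.1 <;> by_cases h2 : -b.1 < -a.1 <;> by_cases h3 : a.2 < b.2 <;>
      simp [h1, h2, h3, Prod.Lex.toLex_lt_toLex] <;> omega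
  rw [PySem.List.sorted_eq_foldl_insertBy]
  show List.foldl (fun acc x => PySem.List.insertBy
      (fun (a b : Int × Int) => decide (-a.1 < -b.1)
        || (!decide (-b.1 < -a.1) && decide (a.2 < b.2))) x acc) [] xs = _
  rw [hbe]

-- the canonical rock list is strictly increasing in the lex key
theorem pv_rocks_pairwise (d0 : PySem.Dict (Int × Int) String) (m : Int) :
    ∀ (k : Nat) (r : Int), r + 1 ≤ (k : Int) →
    (pvRocks d0 r m).Pairwise (fun a b =>
      (toLex (-a.1, a.2) : Int ×ₗ Int) < toLex (-b.1, b.2)) := by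
  intro k
  induction k with
  | zero =>
    intro r hr
    rw [pvRocks_nil d0 r m (by omega)]
    exact List.Pairwise.nil
  | succ k ih =>
    intro r hr
    by_cases hneg : r ≤ -1
    · rw [pvRocks_nil d0 r m hneg]
      exact List.Pairwise.nil
    · rw [pvRocks_cons d0 r m (by omega), List.pairwise_append]
      refine ⟨?_, ih (r - 1) (by omega), ?_⟩
      · refine List.Pairwise.map _ ?_
          (((PySem.List.pairwise_lt_pyRange_one 0 m).filter _))
        intro c1 c2 h12
        simp [Prod.Lex.toLex_lt_toLex, h12]
      · intro a ha b hb
        simp only [List.mem_map, List.mem_filter] at ha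
        obtain ⟨c, _, rfl⟩ := ha
        have hb' := (pv_mem_rocks d0 (r - 1) m b).mp hb
        simp only [Prod.Lex.toLex_lt_toLex]
        omega

-- membership in B's filtered key list
theorem pv_mem_filtered (d0 : PySem.Dict (Int × Int) String) (hnd : d0.keys.Nodup)
    (n m : Int) (p : Int × Int) :
    p ∈ (d0.items.filter (fun q => q.2 == "O" && decide (0 ≤ q.1.1) && decide (q.1.1 ≤ n - 2)
        && decide (0 ≤ q.1.2) && decide (q.1.2 < m))).map (fun q => q.1) ↔
      0 ≤ p.1 ∧ p.1 ≤ n - 2 ∧ 0 ≤ p.2 ∧ p.2 < m ∧ d0.getD p "" = "O" := by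
  simp only [List.mem_map, List.mem_filter]
  constructor
  · rintro ⟨⟨qk, qv⟩, ⟨hq, hcond⟩, rfl⟩
    simp only [Bool.and_eq_true, beq_iff_eq, decide_eq_true_eq] at hcond
    obtain ⟨⟨⟨⟨hO, h1⟩, h2⟩, h3⟩, h4⟩ := hcond
    have hgd := PySem.Dict.getD_of_mem_items d0 hq hnd ""
    exact ⟨h1, h2, h3, h4, by rw [hgd, hO]⟩
  · rintro ⟨h1, h2, h3, h4, h5⟩
    have hget : d0.get? p = some "O" := by
      rw [PySem.Dict.getD_eq_get?_getD] at h5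
      cases hs : d0.get? p with
      | none => rw [hs] at h5; simp at h5
      | some v => rw [hs] at h5; simp at h5; rw [h5]
    refine ⟨(p, "O"), ⟨PySem.Dict.mem_items_of_get?_eq_some d0 hget, ?_⟩, rfl⟩
    simp [h1, h2, h3, h4]

-- B's sorted rock list IS the canonical processing order
theorem pv_sort_eq (d0 : PySem.Dict (Int × Int) String) (hnd : d0.keys.Nodup) (n m : Int) :
    PySem.List.sorted2
      ((d0.items.filter (fun p => p.2 == "O" && decide (0 ≤ p.1.1) && decide (p.1.1 ≤ n - 2)
          && decide (0 ≤ p.1.2) && decide (p.1.2 < m))).map (fun p => p.1))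
      (fun pos => -pos.1) (fun pos => pos.2)
      = pvRocks d0 (n - 2) m := by
  rw [pv_sorted2_eq_lex]
  apply PySem.List.sorted_eq_of_perm_of_pairwise_lt
  · have hpw := pv_rocks_pairwise d0 m (n - 1).toNat (n - 2) (by omega)
    have hnd1 : (pvRocks d0 (n - 2) m).Nodup := by
      refine hpw.imp ?_
      intro a b hlt he
      rw [he] at hlt
      exact absurd hlt (lt_irrefl _)
    have hnd2 : ((d0.items.filter (fun p => p.2 == "O" && decide (0 ≤ p.1.1)
        && decide (p.1.1 ≤ n - 2) && decide (0 ≤ p.1.2) && decide (p.1.2 < m))).map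
        (fun p => p.1)).Nodup := by
      refine List.Nodup.sublist (List.Sublist.map _ (List.filter_sublist)) ?_
      exact hnd
    apply List.perm_of_nodup_nodup_toFinset_eq hnd1 hnd2
    ext p
    simp only [List.mem_toFinset]
    rw [pv_mem_rocks, pv_mem_filtered d0 hnd n m]
  · exact pv_rocks_pairwise d0 m (n - 1).toNat (n - 2) (by omega)

-- ===== VERDICT (by name: the statement is the Claim_ definition above) =====
theorem move_grid_south_spec : Claim_equal_move_grid_south := by
  intro grid bounds _
  unfold Spec_move_grid_south move_grid_south move_grid_south_alt
  have hnd : (pvToDict grid).keys.Nodup := by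
    unfold pvToDict
    exact PySem.Dict.nodup_keys_foldl_insert_key grid (fun e => (e.1, e.2.1))
      (fun d e => e.2.2) PySem.Dict.empty PySem.Dict.nodup_keys_empty
  rw [pv_sort_eq (pvToDict grid) hnd bounds.1 bounds.2]
  rw [pv_grid_eq (pvToDict grid) bounds.2 (bounds.1 - 1).toNat (bounds.1 - 2) (by omega)
    (pvToDict grid, false) (fun a b _ => rfl)]
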